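-- pv_equiv track=rewrite | github.com/weiyangzen/awesome_algorithms | Algorithms/数学-组合数学-0555-Burnside引理/demo.py | burnside_orbit_count
-- ===== SOURCE A (Python) =====
-- from typing import Iterable, List, Sequence, Tuple
--
-- Permutation = Tuple[int, ...]
--
-- def _validate_positive_int(name: str, value: int) -> None:
--     if not isinstance(value, int):
--         raise TypeError(f"{name} must be int, got {type(value).__name__}")
--     if value < 1:
--         raise ValueError(f"{name} must be >= 1, got {value}")
--
-- def _validate_permutation(perm: Permutation) -> None:
--     n = len(perm)
--     if sorted(perm) != list(range(n)):
--         raise ValueError(f"invalid permutation: {perm}")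
--
-- def cycle_count(perm: Permutation) -> int:
--     """Count disjoint cycles in a permutation."""
--     _validate_permutation(perm)
--     n = len(perm)
--     visited = [False] * n
--     count = 0
--
--     for i in range(n):
--         if visited[i]:
--             continue
--         count += 1
--         j = i
--         while not visited[j]:
--             visited[j] = True
--             j = perm[j]
--
--     return count
--
-- def fixed_colorings_count(n_colors: int, perm: Permutation) -> int:
--     """Number of colorings fixed by perm, equals n_colors^(cycle_count)."""
--     _validate_positive_int("n_colors", n_colors)
--     return n_colors ** cycle_count(perm)
--
-- def burnside_orbit_count(n_colors: int, group: Sequence[Permutation]) -> int: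
--     """Compute |X/G| by Burnside lemma with explicit fixed-point accumulation."""
--     _validate_positive_int("n_colors", n_colors)
--     if len(group) == 0:
--         raise ValueError("group must be non-empty")
--
--     total_fixed = 0
--     for perm in group:
--         total_fixed += fixed_colorings_count(n_colors, perm)
--
--     if total_fixed % len(group) != 0:
--         raise ArithmeticError("Burnside average must be integer")
--     return total_fixed // len(group)
-- ===== SOURCE B (Python) =====
-- from typing import Sequence, Tuple
--
-- Permutation = Tuple[int, ...]
--
-- def _is_cycle_head(perm: Sequence[int], i: int) -> bool:
--     """i heads its cycle iff the walk perm[i], perm[perm[i]], ... stays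
--     above i until it returns to i (i is the minimal element of its cycle)."""
--     j = perm[i]
--     while j > i:
--         j = perm[j]
--     return j == i
--
-- def _cycles(perm: Permutation) -> int:
--     """Count cycles of perm without auxiliary storage: one cycle per head."""
--     n = len(perm)
--     if len(set(perm)) != n or any(not (0 <= x < n) for x in perm):
--         raise ValueError(f"invalid permutation: {perm}")
--     return sum(1 for i in range(n) if _is_cycle_head(perm, i))
--
-- def burnside_orbit_count(n_colors: int, group: Sequence[Permutation]) -> int:
--     """Compute |X/G| by Burnside lemma, counting each cycle at its minimal element."""
--     if not isinstance(n_colors, int):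
--         raise TypeError(f"n_colors must be int, got {type(n_colors).__name__}")
--     if n_colors < 1:
--         raise ValueError(f"n_colors must be >= 1, got {n_colors}")
--     if not group:
--         raise ValueError("group must be non-empty")
--
--     total = sum(n_colors ** _cycles(perm) for perm in group)
--     q, r = divmod(total, len(group))
--     if r:
--         raise ArithmeticError("Burnside average must be integer")
--     return q
-- ===== Notes on version B (the rewrite author's own statement) =====
-- stated objective: alternative
-- what changed: cycle counting drops A's visited array and orbit-marking walk: each cycle is counted once at its minimal element by a constant-memory chase (j = perm[i]; while j > i: j = perm[j]); permutation validity is checked via set cardinality plus a range test instead of sorting, and the Burnside total is a generator sum with divmod instead of an explicit accumulator loop with % and //.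
import Mathlib
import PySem

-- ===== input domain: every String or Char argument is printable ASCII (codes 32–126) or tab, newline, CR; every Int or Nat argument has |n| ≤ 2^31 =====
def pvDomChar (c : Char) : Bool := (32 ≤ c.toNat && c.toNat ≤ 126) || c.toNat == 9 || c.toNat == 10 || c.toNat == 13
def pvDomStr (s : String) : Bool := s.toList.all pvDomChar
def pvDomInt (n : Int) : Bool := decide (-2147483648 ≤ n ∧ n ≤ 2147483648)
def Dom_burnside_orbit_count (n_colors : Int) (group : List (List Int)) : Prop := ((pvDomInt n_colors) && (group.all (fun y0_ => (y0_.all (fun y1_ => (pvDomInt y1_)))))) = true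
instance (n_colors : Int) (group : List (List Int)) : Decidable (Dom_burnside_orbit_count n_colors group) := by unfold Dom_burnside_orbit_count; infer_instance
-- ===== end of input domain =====

-- B replaces A's visited-array orbit walk in cycle_count by counting each cycle at its minimal
-- element with a constant-memory chase, validates by set cardinality + range instead of sorting,
-- and accumulates the Burnside total as a mapped sum with divmod (objective: alternative; not faster).

-- ===== PORT A =====
-- A's indexing step j = perm[j] (indices are in range on validated permutations)
def pvStep (perm : List Int) (j : Nat) : Nat := (perm.getD j 0).toNat

-- A's _validate_permutation test: sorted(perm) == list(range(n)); ports return junk 0 where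
-- their Python raises (outside Pre_)
def pvValid (perm : List Int) : Bool :=
  decide (PySem.List.sorted perm (fun x => x) = (List.range perm.length).map (fun (m : Nat) => (m : Int)))

-- inner `while not visited[j]: visited[j] = True; j = perm[j]`; fuel n+1 always suffices
def pvMarkCycle (perm : List Int) : Nat → Nat → List Bool → List Bool
  | 0, _, v => v
  | fuel+1, j, v =>
      if v.getD j true then v
      else pvMarkCycle perm fuel (pvStep perm j) (v.set j true)

-- A's cycle_count: visited array, count a cycle when its start is unvisited, mark its orbit
def pvCycleCountA (perm : List Int) : Nat :=
  ((List.range perm.length).foldl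
    (fun st i =>
      if st.2.getD i true then st
      else (st.1 + 1, pvMarkCycle perm (perm.length + 1) i st.2))
    ((0 : Nat), List.replicate perm.length false)).1

def burnside_orbit_count (n_colors : Int) (group : List (List Int)) : Int :=
  if n_colors < 1 then 0            -- ValueError in Python
  else if group.length = 0 then 0   -- ValueError in Python
  else if group.all pvValid then
    if PySem.Int.mod (group.foldl (fun t perm => t + n_colors ^ pvCycleCountA perm) 0)
        (group.length : Int) ≠ 0 then 0   -- ArithmeticError in Python
    else PySem.Int.floordiv (group.foldl (fun t perm => t + n_colors ^ pvCycleCountA perm) 0)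
        (group.length : Int)
  else 0                            -- ValueError (invalid permutation) in Python

-- ===== PORT B =====
-- B's _is_cycle_head chase `j = perm[i]; while j > i: j = perm[j]; return j == i`
-- (fuel n always suffices on a valid permutation)
def pvChase (perm : List Int) (i : Nat) : Nat → Nat → Nat
  | 0, j => j
  | fuel+1, j => if i < j then pvChase perm i fuel ((perm.getD j 0).toNat) else j

-- B's validity test: len(set(perm)) == n and every entry in [0, n)
def pvValidB (perm : List Int) : Bool :=
  ((PySem.Set.ofList perm).length == perm.length) &&
  perm.all (fun x => decide (0 ≤ x ∧ x < (perm.length : Int)))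

-- B's _cycles: sum(1 for i in range(n) if _is_cycle_head(perm, i))
def pvCyclesB (perm : List Int) : Nat :=
  (List.range perm.length).countP
    (fun i => pvChase perm i perm.length ((perm.getD i 0).toNat) == i)

def burnside_orbit_count_alt (n_colors : Int) (group : List (List Int)) : Int :=
  if n_colors < 1 then 0            -- ValueError in Python
  else if group = [] then 0         -- ValueError in Python
  else if group.all pvValidB then
    match PySem.Int.divmod? ((group.map (fun perm => n_colors ^ pvCyclesB perm)).sum)
        (group.length : Int) with
    | some (q, r) => if r ≠ 0 then 0 else q   -- ArithmeticError in Python when r ≠ 0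
    | none => 0                               -- unreachable: group ≠ []
  else 0                            -- ValueError (invalid permutation) in Python

-- ===== PRECONDITION & SPEC =====
-- helper used only to STATE Pre_'s divisibility: the number of cycles of a valid permutation,
-- characterised independently of either port (i is counted iff it is minimal in its orbit)
def pvSpecCycles (perm : List Int) : Nat :=
  (List.range perm.length).countP (fun i =>
    (List.range (perm.length + 1)).all (fun s => decide (i ≤ (pvStep perm)^[s] i)))

-- Pre_ excludes exactly the inputs on which A raises: n_colors < 1 (ValueError), an empty group
-- (ValueError), an invalid permutation (ValueError), or a non-integer Burnside average
-- (ArithmeticError); A returns on every other input.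
def Pre_burnside_orbit_count (n_colors : Int) (group : List (List Int)) : Prop :=
  1 ≤ n_colors ∧ group ≠ [] ∧
  (∀ perm ∈ group,
    PySem.List.sorted perm (fun x => x) = (List.range perm.length).map (fun (m : Nat) => (m : Int))) ∧
  PySem.Int.mod (group.foldl (fun t perm => t + n_colors ^ pvSpecCycles perm) 0)
    (group.length : Int) = 0

instance (n_colors : Int) (group : List (List Int)) : Decidable (Pre_burnside_orbit_count n_colors group) := by
  unfold Pre_burnside_orbit_count; infer_instance

def pvWitness_burnside_orbit_count : Int × List (List Int) := (2, [[0, 1], [1, 0]])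

def Spec_burnside_orbit_count (n_colors : Int) (group : List (List Int)) (out : Int) : Prop :=
  out = burnside_orbit_count_alt n_colors group
instance (n_colors : Int) (group : List (List Int)) (out : Int) : Decidable (Spec_burnside_orbit_count n_colors group out) := by
  unfold Spec_burnside_orbit_count; infer_instance

-- ===== CLAIM (what is proved, stated in full; the proofs are below) =====
def Claim_equal_burnside_orbit_count : Prop :=
  ∀ (n_colors : Int) (group : List (List Int)), Dom_burnside_orbit_count n_colors group →
    Pre_burnside_orbit_count n_colors group →
    Spec_burnside_orbit_count n_colors group (burnside_orbit_count n_colors group)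

-- ===== LEMMAS AND PROOFS =====

-- iterates of perm stay inside [0, n)
lemma pv_iter_lt (perm : List Int) (hr : ∀ j < perm.length, pvStep perm j < perm.length) :
    ∀ (s i : Nat), i < perm.length → (pvStep perm)^[s] i < perm.length := by
  intro s
  induction s with
  | zero => intro i hi; simpa using hi
  | succ s ih => intro i hi; rw [Function.iterate_succ_apply]; exact ih _ (hr i hi)

-- cancellation: iterates of an injective map are injective
lemma pv_iter_cancel (perm : List Int)
    (hr : ∀ j < perm.length, pvStep perm j < perm.length)
    (hi : ∀ a < perm.length, ∀ b < perm.length, pvStep perm a = pvStep perm b → a = b) :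
    ∀ (s a b : Nat), a < perm.length → b < perm.length →
      (pvStep perm)^[s] a = (pvStep perm)^[s] b → a = b := by
  intro s
  induction s with
  | zero => intro a b _ _ h; simpa using h
  | succ s ih =>
      intro a b ha hb h
      rw [Function.iterate_succ_apply, Function.iterate_succ_apply] at h
      exact hi a ha b hb (ih _ _ (hr a ha) (hr b hb) h)

-- every point of [0, n) is periodic with period between 1 and n
lemma pv_period (perm : List Int)
    (hr : ∀ j < perm.length, pvStep perm j < perm.length)
    (hi : ∀ a < perm.length, ∀ b < perm.length, pvStep perm a = pvStep perm b → a = b) :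
    ∀ i < perm.length, ∃ L, 0 < L ∧ L ≤ perm.length ∧ (pvStep perm)^[L] i = i := by
  intro i hin
  obtain ⟨a, ha, b, hb, hne, heq⟩ := Finset.exists_ne_map_eq_of_card_lt_of_maps_to
    (s := Finset.range (perm.length + 1)) (t := Finset.range perm.length)
    (by simp) (f := fun s => (pvStep perm)^[s] i)
    (fun s _ => by simpa using pv_iter_lt perm hr s i hin)
  simp only [Finset.mem_range] at ha hb
  rcases Nat.lt_or_ge a b with hab | hab
  · refine ⟨b - a, by omega, by omega, ?_⟩
    have hdec : (pvStep perm)^[a] ((pvStep perm)^[b - a] i) = (pvStep perm)^[a] i := by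
      rw [← Function.iterate_add_apply]
      have : a + (b - a) = b := by omega
      rw [this, heq]
    exact pv_iter_cancel perm hr hi a _ _ (pv_iter_lt perm hr _ i hin) hin hdec
  · have hab' : b < a := by omega
    refine ⟨a - b, by omega, by omega, ?_⟩
    have hdec : (pvStep perm)^[b] ((pvStep perm)^[a - b] i) = (pvStep perm)^[b] i := by
      rw [← Function.iterate_add_apply]
      have : b + (a - b) = a := by omega
      rw [this, heq]
    exact pv_iter_cancel perm hr hi b _ _ (pv_iter_lt perm hr _ i hin) hin hdec

-- iterates repeat modulo any period
lemma pv_iter_mod (perm : List Int) (i L : Nat) (hL : (pvStep perm)^[L] i = i) :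
    ∀ s, (pvStep perm)^[s] i = (pvStep perm)^[s % L] i := by
  by_cases hL0 : L = 0
  · subst hL0; simp
  intro s
  induction s using Nat.strong_induction_on with
  | _ s ih =>
    by_cases hs : s < L
    · rw [Nat.mod_eq_of_lt hs]
    · push Not at hs
      have h2 : (pvStep perm)^[s] i = (pvStep perm)^[s - L] i := by
        conv_lhs => rw [show s = (s - L) + L by omega]
        rw [Function.iterate_add_apply, hL]
      have h3 : s % L = (s - L) % L := by
        conv_lhs => rw [show s = (s - L) + L by omega]
        rw [Nat.add_mod_right]
      rw [h2, h3]
      exact ih (s - L) (by omega)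

-- reachability is symmetric inside [0, n)
lemma pv_reach_symm (perm : List Int)
    (hr : ∀ j < perm.length, pvStep perm j < perm.length)
    (hi : ∀ a < perm.length, ∀ b < perm.length, pvStep perm a = pvStep perm b → a = b) :
    ∀ i j, i < perm.length → (∃ s, (pvStep perm)^[s] i = j) →
      ∃ t, (pvStep perm)^[t] j = i := by
  rintro i j hin ⟨s, hs⟩
  obtain ⟨L, hL0, hLn, hper⟩ := pv_period perm hr hi i hin
  have hle : s ≤ L * (s + 1) := by
    have := Nat.le_mul_of_pos_left (s + 1) hL0
    omega
  refine ⟨L * (s + 1) - s, ?_⟩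
  rw [← hs, ← Function.iterate_add_apply, Nat.sub_add_cancel hle,
    pv_iter_mod perm i L hper, Nat.mul_mod_right]
  simp

-- a bounded orbit-minimality check extends to all iterates
lemma pv_min_ext (perm : List Int)
    (hr : ∀ j < perm.length, pvStep perm j < perm.length)
    (hi : ∀ a < perm.length, ∀ b < perm.length, pvStep perm a = pvStep perm b → a = b)
    (i : Nat) (hin : i < perm.length)
    (h : ∀ s ≤ perm.length, i ≤ (pvStep perm)^[s] i) : ∀ s, i ≤ (pvStep perm)^[s] i := by
  intro s
  obtain ⟨L, hL0, hLn, hper⟩ := pv_period perm hr hi i hin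
  rw [pv_iter_mod perm i L hper s]
  exact h _ (le_trans (Nat.le_of_lt (Nat.mod_lt s hL0)) hLn)

-- B's chase returns the first iterate ≤ i (given enough fuel)
lemma pv_chase_spec (perm : List Int) (i : Nat) :
    ∀ (fuel : Nat) (j : Nat), (∃ t, t ≤ fuel ∧ (pvStep perm)^[t] j ≤ i) →
      ∃ t, pvChase perm i fuel j = (pvStep perm)^[t] j ∧ (pvStep perm)^[t] j ≤ i ∧
        ∀ s < t, i < (pvStep perm)^[s] j := by
  intro fuel
  induction fuel with
  | zero =>
      rintro j ⟨t, ht, hle⟩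
      have ht0 : t = 0 := by omega
      subst ht0
      exact ⟨0, rfl, hle, by omega⟩
  | succ fuel ih =>
      rintro j ⟨t, ht, hle⟩
      by_cases hij : i < j
      · have ht0 : t ≠ 0 := by
          rintro rfl; simp at hle; omega
        obtain ⟨t', rfl⟩ : ∃ t', t = t' + 1 := ⟨t - 1, by omega⟩
        rw [Function.iterate_succ_apply] at hle
        obtain ⟨u, hu1, hu2, hu3⟩ := ih (pvStep perm j) ⟨t', by omega, hle⟩
        refine ⟨u + 1, ?_, ?_, ?_⟩
        · rw [Function.iterate_succ_apply]
          simpa [pvChase, pvStep, hij] using hu1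
        · rw [Function.iterate_succ_apply]; exact hu2
        · intro s hs
          cases s with
          | zero => simpa using hij
          | succ s => rw [Function.iterate_succ_apply]; exact hu3 s (by omega)
      · exact ⟨0, by simp [pvChase, hij], by simpa using Nat.le_of_not_lt hij,
          by omega⟩

-- B's head test succeeds at i exactly when i is minimal in its orbit
lemma pv_chase_iff (perm : List Int)
    (hr : ∀ j < perm.length, pvStep perm j < perm.length)
    (hi : ∀ a < perm.length, ∀ b < perm.length, pvStep perm a = pvStep perm b → a = b)
    (i : Nat) (hin : i < perm.length) :
    pvChase perm i perm.length (pvStep perm i) = i ↔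
      (∀ s ≤ perm.length, i ≤ (pvStep perm)^[s] i) := by
  obtain ⟨L, hL0, hLn, hper⟩ := pv_period perm hr hi i hin
  have hex : ∃ t, t ≤ perm.length ∧ (pvStep perm)^[t] (pvStep perm i) ≤ i := by
    refine ⟨L - 1, by omega, ?_⟩
    rw [← Function.iterate_succ_apply, show (L - 1).succ = L by omega, hper]
  obtain ⟨t0, hres, hle, hgt⟩ := pv_chase_spec perm i perm.length (pvStep perm i) hex
  constructor
  · intro hwalk s _
    have hper2 : (pvStep perm)^[t0 + 1] i = i := by
      rw [Function.iterate_succ_apply, ← hres, hwalk]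
    rw [pv_iter_mod perm i (t0 + 1) hper2 s]
    cases h : s % (t0 + 1) with
    | zero => simp
    | succ m =>
        have hm : m < t0 := by
          have := Nat.mod_lt s (show 0 < t0 + 1 by omega)
          omega
        rw [Function.iterate_succ_apply]
        exact le_of_lt (hgt m hm)
  · intro hmin
    have hall := pv_min_ext perm hr hi i hin hmin
    have h1 : i ≤ (pvStep perm)^[t0] (pvStep perm i) := by
      rw [← Function.iterate_succ_apply]; exact hall (t0 + 1)
    rw [hres]; omega

-- A's inner walk marks exactly the orbit of its start (on top of what was marked before)
lemma pv_mark_spec (perm : List Int)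
    (hr : ∀ j < perm.length, pvStep perm j < perm.length)
    (hi : ∀ a < perm.length, ∀ b < perm.length, pvStep perm a = pvStep perm b → a = b)
    (k : Nat) (hk : k < perm.length) (Q0 : Nat → Bool)
    (hQ : ∀ j < perm.length, Q0 j = true → ¬ ∃ s, (pvStep perm)^[s] k = j) :
    ∀ (fuel t : Nat) (v : List Bool),
      v.length = perm.length →
      (∀ x < perm.length,
        (v.getD x false = true ↔ (Q0 x = true ∨ ∃ s < t, (pvStep perm)^[s] k = x))) →
      ((Finset.range perm.length).filter (fun x => v.getD x false = false)).card < fuel →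
      (pvMarkCycle perm fuel ((pvStep perm)^[t] k) v).length = perm.length ∧
      ∀ x < perm.length,
        ((pvMarkCycle perm fuel ((pvStep perm)^[t] k) v).getD x false = true ↔
          (Q0 x = true ∨ ∃ s, (pvStep perm)^[s] k = x)) := by
  intro fuel
  induction fuel with
  | zero => intro t v _ _ hcard; exact absurd hcard (Nat.not_lt_zero _)
  | succ fuel ih =>
    intro t v hv hmark hcard
    have hj : (pvStep perm)^[t] k < perm.length := pv_iter_lt perm hr t k hk
    have hjv : (pvStep perm)^[t] k < v.length := hv ▸ hj
    have hgetD : v.getD ((pvStep perm)^[t] k) true = v.getD ((pvStep perm)^[t] k) false := by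
      rw [List.getD_eq_getElem v true hjv, List.getD_eq_getElem v false hjv]
    by_cases hvj : v.getD ((pvStep perm)^[t] k) false = true
    · -- the walk has come back to an already-marked point: it stops here
      have hcond : v.getD ((pvStep perm)^[t] k) true = true := hgetD.trans hvj
      have hstop : pvMarkCycle perm (fuel + 1) ((pvStep perm)^[t] k) v = v := by
        show (if v.getD ((pvStep perm)^[t] k) true then v
          else pvMarkCycle perm fuel (pvStep perm ((pvStep perm)^[t] k))
            (v.set ((pvStep perm)^[t] k) true)) = v
        rw [if_pos hcond]
      rw [hstop]
      refine ⟨hv, ?_⟩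
      have hmem := (hmark _ hj).mp hvj
      have hQj : ¬ Q0 ((pvStep perm)^[t] k) = true := fun h => hQ _ hj h ⟨t, rfl⟩
      obtain ⟨s, hst, hs⟩ := hmem.resolve_left hQj
      -- so f^[s] k = f^[t] k with s < t: k is periodic with period t - s
      have hcan : k = (pvStep perm)^[t - s] k := by
        apply pv_iter_cancel perm hr hi s k _ hk (pv_iter_lt perm hr _ k hk)
        rw [← Function.iterate_add_apply, show s + (t - s) = t by omega]
        exact hs
      intro x hx
      rw [hmark x hx]
      constructor
      · rintro (h | ⟨s', _, hs'⟩)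
        · exact Or.inl h
        · exact Or.inr ⟨s', hs'⟩
      · rintro (h | ⟨s', hs'⟩)
        · exact Or.inl h
        · refine Or.inr ⟨s' % (t - s), ?_, ?_⟩
          · have := Nat.mod_lt s' (show 0 < t - s by omega)
            omega
          · rw [← pv_iter_mod perm k (t - s) hcan.symm s']
            exact hs'
    · -- unmarked: mark it and continue the walk
      have hcond : ¬ v.getD ((pvStep perm)^[t] k) true = true := by
        rw [hgetD]; exact hvj
      have hstep : pvMarkCycle perm (fuel + 1) ((pvStep perm)^[t] k) v
          = pvMarkCycle perm fuel ((pvStep perm)^[t + 1] k) (v.set ((pvStep perm)^[t] k) true) := by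
        rw [Function.iterate_succ_apply' (pvStep perm) t k]
        show (if v.getD ((pvStep perm)^[t] k) true then v
          else pvMarkCycle perm fuel (pvStep perm ((pvStep perm)^[t] k))
            (v.set ((pvStep perm)^[t] k) true)) = _
        rw [if_neg hcond]
      rw [hstep]
      apply ih (t + 1)
      · rw [List.length_set]; exact hv
      · intro x hx
        have hxset : x < (v.set ((pvStep perm)^[t] k) true).length := by
          rw [List.length_set]; exact hv ▸ hx
        rw [List.getD_eq_getElem _ false hxset, List.getElem_set]
        by_cases hxj : (pvStep perm)^[t] k = x
        · rw [if_pos hxj]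
          constructor
          · intro _; exact Or.inr ⟨t, by omega, hxj⟩
          · intro _; rfl
        · rw [if_neg hxj, ← List.getD_eq_getElem v false (hv ▸ hx), hmark x hx]
          constructor
          · rintro (h | ⟨s, hst, hs⟩)
            · exact Or.inl h
            · exact Or.inr ⟨s, by omega, hs⟩
          · rintro (h | ⟨s, hst, hs⟩)
            · exact Or.inl h
            · have hsne : s ≠ t := fun hse => hxj (hse ▸ hs)
              exact Or.inr ⟨s, by omega, hs⟩
      · -- the number of unmarked cells strictly decreased
        have hsub : (Finset.range perm.length).filter
              (fun x => (v.set ((pvStep perm)^[t] k) true).getD x false = false)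
            ⊂ (Finset.range perm.length).filter (fun x => v.getD x false = false) := by
          constructor
          · intro x hxmem
            simp only [Finset.mem_filter, Finset.mem_range] at hxmem ⊢
            obtain ⟨hx, hxf⟩ := hxmem
            refine ⟨hx, ?_⟩
            have hxset : x < (v.set ((pvStep perm)^[t] k) true).length := by
              rw [List.length_set]; exact hv ▸ hx
            rw [List.getD_eq_getElem _ false hxset, List.getElem_set] at hxf
            by_cases hxj : (pvStep perm)^[t] k = x
            · rw [if_pos hxj] at hxf; exact absurd hxf (by simp)
            · rw [if_neg hxj] at hxf
              rw [List.getD_eq_getElem v false (hv ▸ hx)]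
              exact hxf
          · intro hss
            have hjmem : (pvStep perm)^[t] k ∈ (Finset.range perm.length).filter
                (fun x => v.getD x false = false) := by
              simp only [Finset.mem_filter, Finset.mem_range]
              exact ⟨hj, by simpa using hvj⟩
            have := hss hjmem
            simp only [Finset.mem_filter, Finset.mem_range] at this
            obtain ⟨-, hbad⟩ := this
            rw [List.getD_eq_getElem _ false (by rw [List.length_set]; exact hjv),
              List.getElem_set, if_pos rfl] at hbad
            exact absurd hbad (by simp)
        have := Finset.card_lt_card hsub
        omega

-- the fold step of A's outer loop, named for the invariant proof
def pvStepA (perm : List Int) (st : Nat × List Bool) (i : Nat) : Nat × List Bool :=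
  if st.2.getD i true then st
  else (st.1 + 1, pvMarkCycle perm (perm.length + 1) i st.2)

-- invariant of A's outer loop: after the first k starts, visited = points whose orbit meets
-- [0, k), and count = number of orbit-minimal points below k
lemma pv_loopA (perm : List Int)
    (hr : ∀ j < perm.length, pvStep perm j < perm.length)
    (hi : ∀ a < perm.length, ∀ b < perm.length, pvStep perm a = pvStep perm b → a = b) :
    ∀ k, k ≤ perm.length →
      (((List.range k).foldl (pvStepA perm) ((0 : Nat), List.replicate perm.length false)).2.length
        = perm.length) ∧
      (∀ x < perm.length,
        (((List.range k).foldl (pvStepA perm) ((0 : Nat), List.replicate perm.length false)).2.getD x false = true ↔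
          ∃ i0 < k, ∃ s, (pvStep perm)^[s] i0 = x)) ∧
      ((List.range k).foldl (pvStepA perm) ((0 : Nat), List.replicate perm.length false)).1
        = (List.range k).countP (fun i =>
            (List.range (perm.length + 1)).all (fun s => decide (i ≤ (pvStep perm)^[s] i))) := by
  intro k
  induction k with
  | zero =>
      intro _
      refine ⟨by simp, ?_, by simp⟩
      intro x hx
      simp
  | succ k ih =>
      intro hk1
      have hk : k < perm.length := by omega
      obtain ⟨ihlen, ihvis, ihcnt⟩ := ih (by omega)
      rw [List.range_succ, List.foldl_append, List.foldl_cons, List.foldl_nil,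
        List.countP_append]
      set st := (List.range k).foldl (pvStepA perm) ((0 : Nat), List.replicate perm.length false)
        with hst
      have hgetD : st.2.getD k true = st.2.getD k false := by
        rw [List.getD_eq_getElem st.2 true (ihlen ▸ hk), List.getD_eq_getElem st.2 false (ihlen ▸ hk)]
      by_cases hvk : st.2.getD k false = true
      · -- k already visited: some smaller start reaches k, so k is not minimal in its orbit
        obtain ⟨i0, hi0k, s, hs⟩ := (ihvis k hk).mp hvk
        have hi0n : i0 < perm.length := by omega
        obtain ⟨tt, htt⟩ := pv_reach_symm perm hr hi i0 k hi0n ⟨s, hs⟩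
        have hpred : ((List.range (perm.length + 1)).all
            (fun s => decide (k ≤ (pvStep perm)^[s] k))) = false := by
          rw [Bool.eq_false_iff]
          intro hall
          rw [List.all_eq_true] at hall
          obtain ⟨L, hL0, hLn, hper⟩ := pv_period perm hr hi k hk
          have hmem : tt % L ∈ List.range (perm.length + 1) := by
            rw [List.mem_range]
            have := Nat.mod_lt tt hL0
            omega
          have := hall _ hmem
          rw [decide_eq_true_eq] at this
          rw [← pv_iter_mod perm k L hper tt, htt] at this
          omega
        have hskip : pvStepA perm st k = st := by
          unfold pvStepA
          rw [if_pos (hgetD.trans hvk)]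
        rw [hskip]
        refine ⟨ihlen, ?_, ?_⟩
        · intro x hx
          rw [ihvis x hx]
          constructor
          · rintro ⟨j0, hj0, hreach⟩; exact ⟨j0, by omega, hreach⟩
          · rintro ⟨j0, hj0, s', hs'⟩
            by_cases hj0k : j0 < k
            · exact ⟨j0, hj0k, s', hs'⟩
            · have : j0 = k := by omega
              subst this
              exact ⟨i0, hi0k, s' + s, by
                rw [Function.iterate_add_apply, hs, hs']⟩
        · simp [hpred, ihcnt]
      · -- k unvisited: no smaller start reaches k, k is minimal; count it and mark its orbit
        have hnotv : ¬ ∃ i0 < k, ∃ s, (pvStep perm)^[s] i0 = k := fun h => hvk ((ihvis k hk).mpr h)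
        have hmin : ∀ s, k ≤ (pvStep perm)^[s] k := by
          intro s
          by_contra hlt
          push Not at hlt
          have hm : (pvStep perm)^[s] k < perm.length := pv_iter_lt perm hr s k hk
          obtain ⟨tt, htt⟩ := pv_reach_symm perm hr hi k _ hk ⟨s, rfl⟩
          exact hnotv ⟨(pvStep perm)^[s] k, hlt, tt, htt⟩
        have hpred : ((List.range (perm.length + 1)).all
            (fun s => decide (k ≤ (pvStep perm)^[s] k))) = true := by
          rw [List.all_eq_true]
          intro s _
          exact decide_eq_true (hmin s)
        have hmark := pv_mark_spec perm hr hi k hk (fun x => st.2.getD x false)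
          (fun j hjn hQ0 hreach => by
            obtain ⟨i0, hi0k, s', hs'⟩ := (ihvis j hjn).mp hQ0
            obtain ⟨tt, htt⟩ := pv_reach_symm perm hr hi k j hk hreach
            exact hnotv ⟨i0, hi0k, tt + s', by
              rw [Function.iterate_add_apply, hs', htt]⟩)
          (perm.length + 1) 0 st.2 ihlen
          (fun x hx => by simp)
          (by
            have := Finset.card_filter_le (Finset.range perm.length)
              (fun x => st.2.getD x false = false)
            simp only [Finset.card_range] at this
            omega)
        rw [Function.iterate_zero_apply] at hmark
        obtain ⟨hmlen, hmvis⟩ := hmark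
        have hgo : pvStepA perm st k
            = (st.1 + 1, pvMarkCycle perm (perm.length + 1) k st.2) := by
          unfold pvStepA
          rw [if_neg (by rw [hgetD]; exact hvk)]
        rw [hgo]
        refine ⟨hmlen, ?_, ?_⟩
        · intro x hx
          rw [hmvis x hx, ihvis x hx]
          constructor
          · rintro (⟨i0, hi0, hreach⟩ | ⟨s, hs⟩)
            · exact ⟨i0, by omega, hreach⟩
            · exact ⟨k, by omega, s, hs⟩
          · rintro ⟨i0, hi0, s, hs⟩
            by_cases hi0k : i0 < k
            · exact Or.inl ⟨i0, hi0k, s, hs⟩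
            · have : i0 = k := by omega
              subst this
              exact Or.inr ⟨s, hs⟩
        · simp [hpred, ihcnt]

-- consequences of _validate_permutation succeeding: perm maps [0,n) into [0,n) injectively,
-- has no duplicates, and every entry lies in [0,n)
lemma pv_valid_facts (perm : List Int)
    (hval : PySem.List.sorted perm (fun x => x) = (List.range perm.length).map (fun (m : Nat) => (m : Int))) :
    (∀ j < perm.length, pvStep perm j < perm.length) ∧
    (∀ a < perm.length, ∀ b < perm.length, pvStep perm a = pvStep perm b → a = b) ∧
    perm.Nodup ∧ (∀ x ∈ perm, 0 ≤ x ∧ x < (perm.length : Int)) := by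
  have hperm : perm.Perm ((List.range perm.length).map (fun (m : Nat) => (m : Int))) := by
    have h := PySem.List.sorted_perm perm (fun x => x) false
    rw [hval] at h
    exact h.symm
  have hmem : ∀ j (hj : j < perm.length), 0 ≤ perm[j] ∧ perm[j] < (perm.length : Int) := by
    intro j hj
    have hmem1 : perm[j] ∈ perm := List.getElem_mem hj
    have h2 := hperm.mem_iff.mp hmem1
    simp only [List.mem_map, List.mem_range] at h2
    obtain ⟨m, hm, hme⟩ := h2
    omega
  have hnd : perm.Nodup := by
    rw [hperm.nodup_iff]
    exact List.Nodup.map Nat.cast_injective List.nodup_range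
  refine ⟨?_, ?_, hnd, ?_⟩
  · intro j hj
    unfold pvStep
    rw [List.getD_eq_getElem perm 0 hj]
    have := hmem j hj
    omega
  · intro a ha b hb h
    unfold pvStep at h
    rw [List.getD_eq_getElem perm 0 ha, List.getD_eq_getElem perm 0 hb] at h
    have h0a := (hmem a ha).1
    have h0b := (hmem b hb).1
    have heq : perm[a] = perm[b] := by omega
    exact (List.Nodup.getElem_inj_iff hnd).mp heq
  · intro x hx
    obtain ⟨j, hj, rfl⟩ := List.mem_iff_getElem.mp hx
    exact hmem j hj

-- A's sort-based validity implies B's set-cardinality + range validity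
lemma pv_validB_of_sorted (perm : List Int)
    (hval : PySem.List.sorted perm (fun x => x) = (List.range perm.length).map (fun (m : Nat) => (m : Int))) :
    pvValidB perm = true := by
  obtain ⟨-, -, hnd, hrange⟩ := pv_valid_facts perm hval
  unfold pvValidB
  rw [Bool.and_eq_true, PySem.Set.ofList_eq_self_of_nodup perm hnd, beq_self_eq_true]
  refine ⟨rfl, ?_⟩
  rw [List.all_eq_true]
  intro x hx
  exact decide_eq_true (hrange x hx)

-- A's cycle counter computes the number of orbit-minimal points
lemma pv_countA (perm : List Int)
    (hval : PySem.List.sorted perm (fun x => x) = (List.range perm.length).map (fun (m : Nat) => (m : Int))) :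
    pvCycleCountA perm = pvSpecCycles perm := by
  obtain ⟨hr, hi, -, -⟩ := pv_valid_facts perm hval
  have h := (pv_loopA perm hr hi perm.length le_rfl).2.2
  simpa [pvCycleCountA, pvSpecCycles, pvStepA] using h

-- B's cycle counter computes the number of orbit-minimal points too
lemma pv_countB (perm : List Int)
    (hval : PySem.List.sorted perm (fun x => x) = (List.range perm.length).map (fun (m : Nat) => (m : Int))) :
    pvCyclesB perm = pvSpecCycles perm := by
  obtain ⟨hr, hi, -, -⟩ := pv_valid_facts perm hval
  unfold pvCyclesB pvSpecCycles
  apply List.countP_congr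
  intro i hmem
  rw [List.mem_range] at hmem
  have hstep : ((perm.getD i 0).toNat : Nat) = pvStep perm i := rfl
  rw [hstep, beq_iff_eq, pv_chase_iff perm hr hi i hmem]
  simp only [List.all_eq_true, List.mem_range, decide_eq_true_eq]
  constructor
  · intro h s hs; exact h s (by omega)
  · intro h s hs; exact h s (by omega)

-- ===== VERDICT (by name: the statement is the Claim_ definition above) =====
theorem burnside_orbit_count_spec : Claim_equal_burnside_orbit_count := by
  intro n_colors group _hdom hpre
  obtain ⟨hc, hne, hvalid, hdvd⟩ := hpre
  have hlen : group.length ≠ 0 := fun h => hne (List.eq_nil_of_length_eq_zero h)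
  have htotA : group.foldl (fun t perm => t + n_colors ^ pvCycleCountA perm) 0
      = group.foldl (fun t perm => t + n_colors ^ pvSpecCycles perm) 0 :=
    PySem.List.foldl_congr_mem _ _ _ _ (fun acc x hx => by rw [pv_countA x (hvalid x hx)])
  have htotB : (group.map (fun perm => n_colors ^ pvCyclesB perm)).sum
      = group.foldl (fun t perm => t + n_colors ^ pvSpecCycles perm) 0 := by
    rw [PySem.List.foldl_add group (fun perm => n_colors ^ pvSpecCycles perm) 0, zero_add]
    exact congrArg List.sum (List.map_congr_left (fun x hx => by rw [pv_countB x (hvalid x hx)]))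
  have hvB : group.all pvValidB = true := by
    rw [List.all_eq_true]
    exact fun x hx => pv_validB_of_sorted x (hvalid x hx)
  have hvA : group.all pvValid = true := by
    rw [List.all_eq_true]
    intro x hx
    exact decide_eq_true (hvalid x hx)
  show burnside_orbit_count n_colors group = burnside_orbit_count_alt n_colors group
  unfold burnside_orbit_count burnside_orbit_count_alt
  rw [if_neg (by omega), if_neg (by omega), if_neg hne, if_pos hvA, if_pos hvB,
    htotA, htotB]
  have hdm : PySem.Int.divmod? (group.foldl (fun t perm => t + n_colors ^ pvSpecCycles perm) 0)
      (group.length : Int)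
      = some (PySem.Int.floordiv (group.foldl (fun t perm => t + n_colors ^ pvSpecCycles perm) 0)
          (group.length : Int),
        PySem.Int.mod (group.foldl (fun t perm => t + n_colors ^ pvSpecCycles perm) 0)
          (group.length : Int)) := by
    unfold PySem.Int.divmod?
    rw [if_neg (by exact_mod_cast hlen)]
    rfl
  rw [hdm, hdvd]
  simp
  intro h
  omega
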